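-- pv_equiv track=rewrite | github.com/caderek/aoc2024 | src/day12/index.py | count_fences
-- ===== SOURCE A (Python) =====
-- def count_fences(grid):
--     h = len(grid)
--     w = len(grid[0])
--     fences = 0
--
--     for y in range(h):
--         prev = '.'
--         for x in range(w):
--             if grid[y][x] != prev:
--                 fences += 1
--                 prev = grid[y][x]
--
--     for x in range(w):
--         prev = '.'
--         for y in range(h):
--             if grid[y][x] != prev:
--                 fences += 1
--                 prev = grid[y][x]
--
--     return fences
-- ===== SOURCE B (Python) =====
-- def count_fences(grid):
--     h = len(grid)
--     w = len(grid[0])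
--     fences = 0
--     for y in range(h):
--         for x in range(w):
--             c = grid[y][x]
--             left = grid[y][x - 1] if x > 0 else '.'
--             up = grid[y - 1][x] if y > 0 else '.'
--             if c != left:
--                 fences += 1
--             if c != up:
--                 fences += 1
--     return fences
-- ===== Notes on version B (the rewrite author's own statement) =====
-- stated objective: alternative
-- what changed: Replaces A's two separate passes (row scan then column scan, each maintaining a running prev variable) with a single nested traversal that compares each cell directly with its left and upper neighbour ('.' sentinel at the edges).
import Mathlib
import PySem

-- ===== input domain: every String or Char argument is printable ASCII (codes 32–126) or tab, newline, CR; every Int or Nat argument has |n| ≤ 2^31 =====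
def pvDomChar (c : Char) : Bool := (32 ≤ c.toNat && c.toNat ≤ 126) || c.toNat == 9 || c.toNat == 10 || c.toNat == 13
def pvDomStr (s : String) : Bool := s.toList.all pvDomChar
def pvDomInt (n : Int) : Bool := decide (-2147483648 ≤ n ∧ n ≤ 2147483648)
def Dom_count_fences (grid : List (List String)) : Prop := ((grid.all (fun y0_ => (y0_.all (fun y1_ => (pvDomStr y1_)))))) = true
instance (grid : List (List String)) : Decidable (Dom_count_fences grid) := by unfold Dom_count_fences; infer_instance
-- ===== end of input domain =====

-- B fuses A's two separate passes (row scan with a running prev, then column scan) into one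
-- nested traversal comparing each cell with its left and upper neighbour; same values, same cost.

-- cell access shared by both ports; within Pre_ every index used is in range, so the defaults are never the result
def pvCell (grid : List (List String)) (y x : Nat) : String :=
  (grid.getD y []).getD x ""

-- ===== PORT A =====
-- inner step of A's row pass: state (fences, prev)
def pvRowStep (grid : List (List String)) (y : Nat) (s : Int × String) (x : Nat) : Int × String :=
  if pvCell grid y x ≠ s.2 then (s.1 + 1, pvCell grid y x) else s

-- inner step of A's column pass
def pvColStep (grid : List (List String)) (x : Nat) (s : Int × String) (y : Nat) : Int × String :=
  if pvCell grid y x ≠ s.2 then (s.1 + 1, pvCell grid y x) else s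

def count_fences (grid : List (List String)) : Int :=
  let h := grid.length
  let w := (grid.headD []).length
  let f1 := (List.range h).foldl
    (fun f y => ((List.range w).foldl (pvRowStep grid y) (f, ".")).1) 0
  (List.range w).foldl
    (fun f x => ((List.range h).foldl (pvColStep grid x) (f, ".")).1) f1

-- ===== PORT B =====
def count_fences_alt (grid : List (List String)) : Int :=
  let h := grid.length
  let w := (grid.headD []).length
  (List.range h).foldl (fun acc y =>
    (List.range w).foldl (fun acc x =>
      let c := pvCell grid y x
      let left := if 0 < x then pvCell grid y (x - 1) else "."
      let up := if 0 < y then pvCell grid (y - 1) x else "."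
      acc + (if c ≠ left then 1 else 0) + (if c ≠ up then 1 else 0)) acc) 0

-- ===== PRECONDITION & SPEC =====
-- Pre_ excludes exactly the inputs where the Python A raises IndexError: the empty grid
-- (grid[0]) and ragged grids with a row shorter than row 0 (grid[y][x] in the column pass).
def Pre_count_fences (grid : List (List String)) : Prop :=
  grid ≠ [] ∧ ∀ row ∈ grid, (grid.headD []).length ≤ row.length
instance (grid : List (List String)) : Decidable (Pre_count_fences grid) := by
  unfold Pre_count_fences; infer_instance

def pvWitness_count_fences : List (List String) := [["A", "A"], ["B", "A"]]

def Spec_count_fences (grid : List (List String)) (out : Int) : Prop := out = count_fences_alt grid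
instance (grid : List (List String)) (out : Int) : Decidable (Spec_count_fences grid out) := by
  unfold Spec_count_fences; infer_instance

-- ===== CLAIM (what is proved, stated in full; the proofs are below) =====
def Claim_equal_count_fences : Prop := ∀ (grid : List (List String)), Dom_count_fences grid → Pre_count_fences grid → Spec_count_fences grid (count_fences grid)

-- ===== LEMMAS AND PROOFS =====

-- transition indicators B sums
def pvDL (grid : List (List String)) (y x : Nat) : Int :=
  if pvCell grid y x ≠ (if 0 < x then pvCell grid y (x - 1) else ".") then 1 else 0
def pvDU (grid : List (List String)) (y x : Nat) : Int :=
  if pvCell grid y x ≠ (if 0 < y then pvCell grid (y - 1) x else ".") then 1 else 0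

lemma foldl_eq_sum (g : Nat → Int) (F : Int → Nat → Int) (hF : ∀ a x, F a x = a + g x) :
    ∀ (n : Nat) (c : Int),
    (List.range n).foldl F c = c + ∑ x ∈ Finset.range n, g x := by
  intro n
  induction n with
  | zero => simp
  | succ n ih =>
    intro c
    rw [List.range_succ, List.foldl_append, List.foldl_cons, List.foldl_nil, ih, hF,
      Finset.sum_range_succ, add_assoc]

-- A's row-pass inner loop: value and final prev
lemma rowA (grid : List (List String)) (y : Nat) : ∀ (n : Nat) (f : Int),
    (List.range n).foldl (pvRowStep grid y) (f, ".") =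
      (f + ∑ x ∈ Finset.range n, pvDL grid y x,
       if 0 < n then pvCell grid y (n - 1) else ".") := by
  intro n
  induction n with
  | zero => simp
  | succ n ih =>
    intro f
    rw [List.range_succ, List.foldl_append, ih, List.foldl_cons, List.foldl_nil,
      Finset.sum_range_succ]
    rcases Nat.eq_zero_or_pos n with h | h
    · subst h
      by_cases hc : pvCell grid y 0 ≠ "."
      · simp [pvRowStep, pvDL, hc]
      · simp only [ne_eq, not_not] at hc; simp [pvRowStep, pvDL, hc]
    · have hn : n + 1 - 1 = n := rfl
      simp only [pvRowStep, pvDL, h, if_pos, hn, Nat.succ_pos]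
      by_cases hc : pvCell grid y n ≠ pvCell grid y (n - 1)
      · simp [hc, add_assoc]
      · simp only [ne_eq, not_not] at hc; simp [hc]

-- A's column-pass inner loop
lemma colA (grid : List (List String)) (x : Nat) : ∀ (n : Nat) (f : Int),
    (List.range n).foldl (pvColStep grid x) (f, ".") =
      (f + ∑ y ∈ Finset.range n, pvDU grid y x,
       if 0 < n then pvCell grid (n - 1) x else ".") := by
  intro n
  induction n with
  | zero => simp
  | succ n ih =>
    intro f
    rw [List.range_succ, List.foldl_append, ih, List.foldl_cons, List.foldl_nil,
      Finset.sum_range_succ]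
    rcases Nat.eq_zero_or_pos n with h | h
    · subst h
      by_cases hc : pvCell grid 0 x ≠ "."
      · simp [pvColStep, pvDU, hc]
      · simp only [ne_eq, not_not] at hc; simp [pvColStep, pvDU, hc]
    · have hn : n + 1 - 1 = n := rfl
      simp only [pvColStep, pvDU, h, if_pos, hn, Nat.succ_pos]
      by_cases hc : pvCell grid n x ≠ pvCell grid (n - 1) x
      · simp [hc, add_assoc]
      · simp only [ne_eq, not_not] at hc; simp [hc]

lemma countA (grid : List (List String)) :
    count_fences grid =
      (∑ y ∈ Finset.range grid.length, ∑ x ∈ Finset.range (grid.headD []).length, pvDL grid y x) +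
      (∑ x ∈ Finset.range (grid.headD []).length, ∑ y ∈ Finset.range grid.length, pvDU grid y x) := by
  simp only [count_fences]
  rw [foldl_eq_sum (fun y => ∑ x ∈ Finset.range (grid.headD []).length, pvDL grid y x)
    _ (fun a y => by rw [rowA]) grid.length 0]
  rw [foldl_eq_sum (fun x => ∑ y ∈ Finset.range grid.length, pvDU grid y x)
    _ (fun a x => by rw [colA]) (grid.headD []).length]
  rw [zero_add]

lemma countB (grid : List (List String)) :
    count_fences_alt grid =
      ∑ y ∈ Finset.range grid.length, ∑ x ∈ Finset.range (grid.headD []).length,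
        (pvDL grid y x + pvDU grid y x) := by
  simp only [count_fences_alt]
  rw [foldl_eq_sum (fun y => ∑ x ∈ Finset.range (grid.headD []).length,
      (pvDL grid y x + pvDU grid y x))
    _ (fun a y => by
      rw [foldl_eq_sum (fun x => pvDL grid y x + pvDU grid y x)
        _ (fun b x => by simp only [pvDL, pvDU, add_assoc]) (grid.headD []).length a])
    grid.length 0, zero_add]

-- ===== VERDICT (by name: the statement is the Claim_ definition above) =====
theorem count_fences_spec : Claim_equal_count_fences := by
  intro grid _ _
  unfold Spec_count_fences
  rw [countA, countB]
  rw [Finset.sum_comm (s := Finset.range (grid.headD []).length)]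
  rw [← Finset.sum_add_distrib]
  refine Finset.sum_congr rfl fun y _ => ?_
  rw [← Finset.sum_add_distrib]
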